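-- pv_equiv track=rewrite | github.com/Dev-StudyGroup/Algorithm | Week_0/Jimin/[kakao]신규아이디추천.py | solution
-- ===== SOURCE A (Python) =====
-- def solution(new_id):
--     answer = new_id
--
--     # 1단계
--     answer = answer.lower()
--
--     # 2, 3단계
--     temp = ''
--     isOne = True
--     for i in answer:
--         if i != '.' and ((ord(i) >= 97 and ord(i) <= 122) or (i.isdigit() == True) or i == '-' or i == '_'):
--             isOne = True
--         if (ord(i) >= 97 and ord(i) <= 122) or (i.isdigit() == True) or i == '-' or i == '_' or i == '.':
--             if isOne:
--                 temp += i
--             if i == '.':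
--                 isOne = False
--             else:
--                 isOne = True
--     answer = temp
--
--     # 4, 5단계
--     if len(answer) == 0:
--         answer = 'a'
--     if answer[0] == '.':
--         answer = answer[1:]
--
--     if len(answer) == 0:
--         answer = 'a'
--     if answer[-1] == '.':
--         answer = answer[:-1]
--
--     # 5단계
--     if len(answer) == 0:
--         answer = 'a'
--
--     # 6단계
--     if len(answer) >= 16:
--         answer = answer[:15]
--     if answer[-1] == '.':
--         answer = answer[:-1]
--
--     # 7단계
--     if len(answer) <= 2:
--         answer = answer + answer[-1] * (3-len(answer))
--
--     return answer
-- ===== SOURCE B (Python) =====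
-- def solution(new_id):
--     s = new_id.lower()
--     s = ''.join(c for c in s if c in 'abcdefghijklmnopqrstuvwxyz0123456789._-')
--     s = s[:1] + ''.join(c for p, c in zip(s, s[1:]) if not (p == '.' and c == '.'))
--     s = s.strip('.') or 'a'
--     s = s[:15].rstrip('.')
--     if len(s) <= 2:
--         s += s[-1] * (3 - len(s))
--     return s
-- ===== Notes on version B (the rewrite author's own statement) =====
-- stated objective: idiomatic
-- what changed: Replaces A's hand-rolled character loop with a stateful isOne flag and its interleaved empty/dot guard chain by a plain pipeline: filter the allowed character class, collapse dot runs, strip boundary dots, substitute the default placeholder when empty, truncate and strip a trailing dot, then pad.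
import Mathlib
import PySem

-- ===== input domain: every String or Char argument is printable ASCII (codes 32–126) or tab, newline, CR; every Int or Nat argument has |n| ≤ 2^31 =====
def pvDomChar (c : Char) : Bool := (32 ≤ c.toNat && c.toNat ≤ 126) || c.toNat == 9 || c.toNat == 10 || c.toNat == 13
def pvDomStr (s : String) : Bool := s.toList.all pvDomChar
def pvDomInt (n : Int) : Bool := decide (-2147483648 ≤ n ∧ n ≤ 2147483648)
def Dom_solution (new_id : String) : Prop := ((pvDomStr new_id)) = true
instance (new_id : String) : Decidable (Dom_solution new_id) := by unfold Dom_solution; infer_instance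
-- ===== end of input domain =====

-- B replaces A's hand-rolled character loop with a stateful flag and A's interleaved empty/dot
-- guard chain by a plain pipeline (filter class, collapse dot pairs, strip boundary dots,
-- default placeholder, truncate+rstrip, pad); objective: idiomatic, same O(n) cost.

-- ===== PORT A =====

-- one step of A's 'for i in answer' loop; state = (temp, isOne)
def aStep (st : List Char × Bool) (i : Char) : List Char × Bool :=
  let st :=
    if i != '.' && ((97 ≤ i.toNat && i.toNat ≤ 122) || PySem.Chars.isdigit i || i == '-' || i == '_')
    then (st.1, true) else st
  if (97 ≤ i.toNat && i.toNat ≤ 122) || PySem.Chars.isdigit i || i == '-' || i == '_' || i == '.' then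
    (if st.2 then st.1 ++ [i] else st.1, i != '.')
  else st

def solution (new_id : String) : String :=
  let answer := (PySem.Str.lower new_id).toList
  let st := answer.foldl aStep ([], true)
  let answer := st.1
  let answer := if answer.length = 0 then ['a'] else answer
  let answer := if PySem.List.pyGet? answer 0 = some '.' then PySem.List.slice answer (some 1) none else answer
  let answer := if answer.length = 0 then ['a'] else answer
  let answer := if PySem.List.pyGet? answer (-1) = some '.' then PySem.List.slice answer none (some (-1)) else answer
  let answer := if answer.length = 0 then ['a'] else answer
  let answer := if 16 ≤ answer.length then PySem.List.slice answer none (some 15) else answer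
  let answer := if PySem.List.pyGet? answer (-1) = some '.' then PySem.List.slice answer none (some (-1)) else answer
  let answer :=
    if answer.length ≤ 2 then
      -- answer[-1]: answer is provably nonempty on this branch, so pyGet? never returns none
      match PySem.List.pyGet? answer (-1) with
      | some c => answer ++ PySem.List.pyRepeat [c] (3 - (answer.length : Int))
      | none => answer
    else answer
  String.ofList answer

-- ===== PORT B =====

-- "'a' <= c <= 'z' or c.isdigit() or c in '._-'"
def bKeep (c : Char) : Bool := ('a' ≤ c && c ≤ 'z') || PySem.Chars.isdigit c || ['.', '_', '-'].contains c

-- "s[:1] + ''.join(c for p, c in zip(s, s[1:]) if not (p == '.' and c == '.'))"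
def bCollapse (s : List Char) : List Char :=
  s.take 1 ++ ((s.zip (s.drop 1)).filter (fun pc => !(pc.1 == '.' && pc.2 == '.'))).map Prod.snd

def solution_alt (new_id : String) : String :=
  let s := (PySem.Str.lower new_id).toList
  let s := s.filter bKeep
  let s := bCollapse s
  let s := PySem.Chars.stripChars s ['.']
  let s := if s = [] then ['a'] else s                                  -- "or 'a'"
  let s := ((s.take 15).reverse.dropWhile (fun c => ['.'].contains c)).reverse  -- exact rstrip('.') of s[:15]
  let s := if s.length ≤ 2 then s ++ List.replicate (3 - s.length) (s.getLastD 'a') else s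
  String.ofList s

-- ===== PRECONDITION & SPEC =====
def Spec_solution (new_id : String) (out : String) : Prop := out = solution_alt new_id
instance (new_id : String) (out : String) : Decidable (Spec_solution new_id out) := by unfold Spec_solution; infer_instance

-- ===== CLAIM (what is proved, stated in full; the proofs are below) =====
def Claim_equal_solution : Prop := ∀ (new_id : String), Dom_solution new_id → Spec_solution new_id (solution new_id)

-- ===== LEMMAS AND PROOFS =====

-- A's membership test (incl. '.')
def aValid (c : Char) : Bool :=
  (97 ≤ c.toNat && c.toNat ≤ 122) || PySem.Chars.isdigit c || c == '-' || c == '_' || c == '.'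

-- collapse adjacent dot pairs (proof-side characterisation of both collapsing loops)
def cd : List Char → List Char
  | [] => []
  | [c] => [c]
  | c :: d :: t => if c == '.' && d == '.' then cd (d :: t) else c :: cd (d :: t)

-- A's loop on the already-filtered characters, as a function of the incoming isOne flag
def gLoop : List Char → Bool → List Char
  | [], _ => []
  | c :: t, b => if c == '.' then (if b then '.' :: gLoop t false else gLoop t false) else c :: gLoop t true

-- isOne after A's loop
def eLoop : List Char → Bool → Bool
  | [], b => b
  | c :: t, b => if aValid c then eLoop t (c != '.') else eLoop t b

-- no two adjacent dots
def NoDD (l : List Char) : Prop := List.IsChain (fun a b : Char => ¬(a = '.' ∧ b = '.')) l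

lemma valid_eq : ∀ c, aValid c = bKeep c := by
  intro c
  rw [Bool.eq_iff_iff]
  simp only [aValid, bKeep, List.contains_cons, Bool.or_eq_true, Bool.and_eq_true,
    decide_eq_true_eq, beq_iff_eq, List.contains_nil, Bool.or_false]
  have h1 : (97 ≤ c.toNat ∧ c.toNat ≤ 122) ↔ ('a' ≤ c ∧ c ≤ 'z') := Iff.rfl
  rw [h1]; tauto

lemma fold_eq : ∀ (cs : List Char) (temp : List Char) (b : Bool),
    cs.foldl aStep (temp, b) = (temp ++ gLoop (cs.filter aValid) b, eLoop cs b) := by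
  intro cs
  induction cs with
  | nil => intro temp b; simp [gLoop, eLoop]
  | cons c t ih =>
    intro temp b
    by_cases hd : c = '.'
    · subst hd
      have hv : aValid '.' = true := by decide
      simp only [List.foldl_cons, List.filter_cons, hv, if_pos]
      have hstep : ∀ tb : List Char × Bool, aStep tb '.' = (if tb.2 then tb.1 ++ ['.'] else tb.1, false) := by
        intro tb; simp [aStep]
      rw [hstep, ih]
      cases b <;> simp [gLoop, eLoop, aValid]
    · by_cases hv : aValid c = true
      · have hnd : (c != '.') = true := by simp [hd]
        have hb : ((97 ≤ c.toNat && c.toNat ≤ 122) || PySem.Chars.isdigit c || c == '-' || c == '_') = true := by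
          simpa [aValid, hd] using hv
        have hstep : aStep (temp, b) c = (temp ++ [c], true) := by
          simp [aStep, hb, hnd]
        simp only [List.foldl_cons, hstep, ih, List.filter_cons, hv, if_pos]
        simp [gLoop, hd, eLoop, hv, hnd]
      · have hstep : aStep (temp, b) c = (temp, b) := by
          simp only [aValid, Bool.or_eq_true] at hv
          push Not at hv
          simp only [aStep]
          rw [if_neg, if_neg] <;> simp_all
        simp only [List.foldl_cons, hstep, ih, List.filter_cons]
        rw [if_neg (by simp [hv]), eLoop]
        simp [hv]

lemma cd_cons_nondot {c : Char} (h : ¬ c = '.') (t : List Char) : cd (c :: t) = c :: cd t := by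
  cases t <;> simp [cd, h]

lemma cd_cons_dot (t : List Char) : cd ('.' :: t) = '.' :: cd (t.dropWhile (· == '.')) := by
  induction t with
  | nil => simp [cd]
  | cons d t' ih =>
    by_cases hd : d = '.'
    · subst hd; rw [show cd ('.' :: '.' :: t') = cd ('.' :: t') from by simp [cd], ih]
      simp
    · simp [cd, hd]

lemma gLoop_spec : ∀ cs : List Char,
    gLoop cs true = cd cs ∧ gLoop cs false = cd (cs.dropWhile (· == '.')) := by
  intro cs
  induction cs with
  | nil => simp [gLoop, cd]
  | cons c t ih =>
    by_cases hd : c = '.'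
    · subst hd
      constructor
      · rw [show gLoop ('.' :: t) true = '.' :: gLoop t false from by simp [gLoop], ih.2, cd_cons_dot]
      · rw [show gLoop ('.' :: t) false = gLoop t false from by simp [gLoop], ih.2]
        simp
    · constructor
      · rw [show gLoop (c :: t) true = c :: gLoop t true from by simp [gLoop, hd], ih.1,
          cd_cons_nondot hd]
      · rw [show gLoop (c :: t) false = c :: gLoop t true from by simp [gLoop, hd], ih.1,
          show List.dropWhile (· == '.') (c :: t) = c :: t from by simp [hd],
          cd_cons_nondot hd]

lemma cd_eq_bCollapse : ∀ s : List Char, cd s = bCollapse s := by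
  intro s
  induction s with
  | nil => simp [cd, bCollapse]
  | cons c t ih =>
    cases t with
    | nil => simp [cd, bCollapse]
    | cons d t' =>
      by_cases h : c = '.' ∧ d = '.'
      · obtain ⟨hc, hdd⟩ := h; subst hc; subst hdd
        rw [show cd ('.' :: '.' :: t') = cd ('.' :: t') from by simp [cd], ih]
        simp [bCollapse]
      · have hb : (!(c == '.' && d == '.')) = true := by
          simp only [Bool.not_eq_eq_eq_not, Bool.not_true, Bool.and_eq_false_iff, beq_eq_false_iff_ne]
          tauto
        rw [show cd (c :: d :: t') = c :: cd (d :: t') from by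
            simp only [cd]; rw [if_neg]; simp only [Bool.and_eq_true, beq_iff_eq]; tauto, ih]
        have hb2 : ((!(c == '.') || !(d == '.')) = true) := by
          simp only [Bool.or_eq_true, Bool.not_eq_eq_eq_not, Bool.not_true, beq_eq_false_iff_ne]
          tauto
        simp [bCollapse, hb2]

lemma cd_head? : ∀ s : List Char, (cd s).head? = s.head? := by
  intro s
  induction s with
  | nil => rfl
  | cons c t ih =>
    cases t with
    | nil => rfl
    | cons d t' =>
      by_cases h : c = '.' ∧ d = '.'
      · obtain ⟨hc, hdd⟩ := h; subst hc; subst hdd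
        rw [show cd ('.' :: '.' :: t') = cd ('.' :: t') from by simp [cd]]
        rw [show ('.' :: '.' :: t' : List Char).head? = ('.' :: t' : List Char).head? from rfl]
        exact ih
      · rw [show cd (c :: d :: t') = c :: cd (d :: t') from by
            simp only [cd]; rw [if_neg]; simp only [Bool.and_eq_true, beq_iff_eq]; tauto]
        rfl

lemma cd_noDD : ∀ s : List Char, NoDD (cd s) := by
  intro s
  induction s with
  | nil => simp [cd, NoDD]
  | cons c t ih =>
    cases t with
    | nil => simp [cd, NoDD]
    | cons d t' =>
      by_cases h : c = '.' ∧ d = '.'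
      · obtain ⟨hc, hdd⟩ := h; subst hc; subst hdd
        rw [show cd ('.' :: '.' :: t') = cd ('.' :: t') from by simp [cd]]
        exact ih
      · rw [show cd (c :: d :: t') = c :: cd (d :: t') from by
            simp only [cd]; rw [if_neg]; simp only [Bool.and_eq_true, beq_iff_eq]; tauto]
        rw [NoDD, List.isChain_cons]
        refine ⟨?_, ih⟩
        intro y hy
        rw [cd_head?] at hy
        simp at hy
        subst hy
        exact h

lemma bCollapse_noDD (l : List Char) : NoDD (bCollapse l) := cd_eq_bCollapse l ▸ cd_noDD l

lemma dropWhile_noDD {l : List Char} (h : NoDD l) :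
    l.dropWhile (· == '.') = if l.head? = some '.' then l.tail else l := by
  cases l with
  | nil => simp
  | cons c t =>
    by_cases hc : c = '.'
    · subst hc
      simp only [List.dropWhile_cons, List.head?_cons, List.tail_cons, beq_self_eq_true]
      cases t with
      | nil => simp
      | cons d t' =>
        have hd : ¬ d = '.' := by
          rw [NoDD, List.isChain_cons] at h
          have := h.1 d (by simp)
          tauto
        simp [hd]
    · simp [hc]

lemma rstrip_noDD {l : List Char} (h : NoDD l) :
    (l.reverse.dropWhile (· == '.')).reverse = if l.getLast? = some '.' then l.dropLast else l := by
  have hrev : NoDD l.reverse := by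
    rw [NoDD, List.isChain_reverse]
    · exact List.IsChain.imp (fun a b hab => by tauto) h
  rw [dropWhile_noDD hrev, List.head?_reverse]
  by_cases hl : l.getLast? = some '.'
  · rw [if_pos hl, if_pos hl, List.tail_reverse, List.reverse_reverse]
  · simp [hl]

lemma pyGet?_zero (l : List Char) : PySem.List.pyGet? l 0 = l.head? := by
  cases l <;> simp [PySem.List.pyGet?, PySem.List.pyIdx?]

lemma pyGet?_negOne (l : List Char) : PySem.List.pyGet? l (-1) = l.getLast? := by
  cases l with
  | nil => simp [PySem.List.pyGet?, PySem.List.pyIdx?]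
  | cons c t =>
    simp only [PySem.List.pyGet?, PySem.List.pyIdx?, List.length_cons]
    rw [if_neg (by omega), if_pos (by push_cast; omega)]
    simp [List.getLast?_eq_getElem?]

lemma slice_negOne (l : List Char) : PySem.List.slice l none (some (-1)) = l.dropLast := by
  simp only [PySem.List.slice, PySem.List.clampIdx]
  rw [if_pos (by omega)]
  cases l with
  | nil => simp
  | cons c t =>
    rw [if_neg (by simp)]
    simp only [List.drop_zero, List.dropLast_eq_take, List.length_cons]
    congr 1
    simp

lemma contains_dot_fun : (fun c => ([('.' : Char)] : List Char).contains c) = (fun c : Char => c == '.') := by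
  funext c; rw [Bool.eq_iff_iff]; simp

lemma aRstrip_eq {l : List Char} (h : NoDD l) :
    (if PySem.List.pyGet? l (-1) = some '.' then PySem.List.slice l none (some (-1)) else l)
      = (l.reverse.dropWhile (· == '.')).reverse := by
  rw [rstrip_noDD h, pyGet?_negOne, slice_negOne]

lemma rstrip_head_ne_dot {l : List Char} (h : NoDD l) (hne : l ≠ []) (hh : l.head? ≠ some '.') :
    ((l.reverse.dropWhile (· == '.')).reverse ≠ [] ∧
      ((l.reverse.dropWhile (· == '.')).reverse).head? = l.head?) := by
  rw [rstrip_noDD h]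
  by_cases hl : l.getLast? = some '.'
  · rw [if_pos hl]
    have hdl : l.dropLast ≠ [] := by
      intro hd
      have := List.dropLast_append_getLast? (l := l) (a := '.') hl
      rw [hd] at this
      simp at this
      rw [← this] at hh
      simp at hh
    refine ⟨hdl, ?_⟩
    obtain ⟨c, t, hct⟩ := List.exists_cons_of_ne_nil hdl
    have : l = c :: (t ++ ['.']) := by
      have h2 := List.dropLast_append_getLast? (l := l) (a := '.') hl
      rw [hct] at h2
      simpa using h2.symm
    rw [hct, this]
    simp
  · rw [if_neg hl]
    exact ⟨hne, rfl⟩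


lemma pad_eq {l : List Char} (hl : l ≠ []) :
    (if l.length ≤ 2 then
        match PySem.List.pyGet? l (-1) with
        | some c => l ++ PySem.List.pyRepeat [c] (3 - (l.length : Int))
        | none => l
      else l)
      = (if l.length ≤ 2 then l ++ List.replicate (3 - l.length) (l.getLastD 'a') else l) := by
  by_cases h2 : l.length ≤ 2
  · rw [if_pos h2, if_pos h2, pyGet?_negOne]
    cases hc : l.getLast? with
    | none => simp [List.getLast?_eq_none_iff] at hc; exact absurd hc hl
    | some c =>
      simp only [PySem.List.pyRepeat_singleton, List.getLastD_eq_getLast?, hc, Option.getD_some]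
      congr 2
      omega
  · rw [if_neg h2, if_neg h2]

def aFinish (t : List Char) : List Char :=
    (let a1 := if t.length = 0 then ['a'] else t
     let a2 := if PySem.List.pyGet? a1 0 = some '.' then PySem.List.slice a1 (some 1) none else a1
     let a3 := if a2.length = 0 then ['a'] else a2
     let a4 := if PySem.List.pyGet? a3 (-1) = some '.' then PySem.List.slice a3 none (some (-1)) else a3
     let a5 := if a4.length = 0 then ['a'] else a4
     let a6 := if 16 ≤ a5.length then PySem.List.slice a5 none (some 15) else a5
     let a7 := if PySem.List.pyGet? a6 (-1) = some '.' then PySem.List.slice a6 none (some (-1)) else a6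
     if a7.length ≤ 2 then
        match PySem.List.pyGet? a7 (-1) with
        | some c => a7 ++ PySem.List.pyRepeat [c] (3 - (a7.length : Int))
        | none => a7
     else a7)

def bFinish (t : List Char) : List Char :=
    (let b1 := PySem.Chars.stripChars t ['.']
     let b2 := if b1 = [] then ['a'] else b1
     let b3 := ((b2.take 15).reverse.dropWhile (fun c => ['.'].contains c)).reverse
     if b3.length ≤ 2 then b3 ++ List.replicate (3 - b3.length) (b3.getLastD 'a') else b3)

lemma tails_eq (t : List Char) (h : NoDD t) : aFinish t = bFinish t := by
  by_cases h0 : t = []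
  · subst h0; rfl
  by_cases h1 : t = ['.']
  · subst h1; rfl
  simp only [aFinish, bFinish]
  rw [show (if t.length = 0 then ['a'] else t) = t from if_neg (by simpa using h0), pyGet?_zero]
  have hu : (if t.head? = some '.' then PySem.List.slice t (some 1) none else t)
      = t.dropWhile (· == '.') := by
    rw [dropWhile_noDD h]
    by_cases hh : t.head? = some '.'
    · rw [if_pos hh, if_pos hh, PySem.List.slice_from _ (by norm_num)]
      simp [List.drop_one]
    · rw [if_neg hh, if_neg hh]
  rw [hu]
  set u := t.dropWhile (· == '.') with hu_def
  have hu_ne : u ≠ [] := by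
    intro hnil
    rw [hu_def, List.dropWhile_eq_nil_iff] at hnil
    obtain ⟨c, t', rfl⟩ := List.exists_cons_of_ne_nil h0
    have hc : c = '.' := by simpa using hnil c (by simp)
    cases t' with
    | nil => exact h1 (by rw [hc])
    | cons d t'' =>
      have hdd : d = '.' := by simpa using hnil d (by simp)
      rw [NoDD, List.isChain_cons] at h
      exact h.1 d (by simp) ⟨hc, hdd⟩
  have hu_noDD : NoDD u := by
    rw [hu_def, dropWhile_noDD h]
    split
    · exact List.IsChain.tail h
    · exact h
  have hu_head : u.head? ≠ some '.' := by
    intro hsome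
    have := List.head?_dropWhile_not (· == '.') t
    rw [← hu_def, hsome] at this
    simp at this
  rw [show (if u.length = 0 then ['a'] else u) = u from if_neg (by simpa using hu_ne),
    aRstrip_eq hu_noDD]
  set v := (u.reverse.dropWhile (· == '.')).reverse with hv_def
  obtain ⟨hv_ne, hv_head⟩ := rstrip_head_ne_dot hu_noDD hu_ne hu_head
  have hv_noDD : NoDD v := by
    rw [hv_def, rstrip_noDD hu_noDD]
    split
    · exact List.IsChain.dropLast hu_noDD
    · exact hu_noDD
  rw [show (if v.length = 0 then ['a'] else v) = v from if_neg (by simp only [List.length_eq_zero_iff]; exact hv_ne)]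
  rw [show (if 16 ≤ v.length then PySem.List.slice v none (some 15) else v) = v.take 15 from by
    by_cases hlen : 16 ≤ v.length
    · rw [if_pos hlen, PySem.List.slice_to _ (by norm_num)]
      rfl
    · rw [if_neg hlen, List.take_of_length_le (by omega)]]
  have hw_noDD : NoDD (v.take 15) := List.IsChain.take hv_noDD 15
  rw [aRstrip_eq hw_noDD]
  have hB1 : PySem.Chars.stripChars t ['.'] = v := by
    simp only [PySem.Chars.stripChars]
    rw [contains_dot_fun, ← hu_def, ← hv_def]
  rw [hB1, if_neg (show ¬ v = [] from hv_ne), contains_dot_fun]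
  have hw_ne : v.take 15 ≠ [] := by
    rw [Ne, List.take_eq_nil_iff]
    rintro (hx | hx)
    · simp at hx
    · exact hv_ne hx
  have hw_head : (v.take 15).head? ≠ some '.' := by
    rw [List.head?_take]
    simp only [if_neg (by norm_num : ¬ (15 : ℕ) = 0)]
    rw [hv_head]
    exact hu_head
  obtain ⟨hfin_ne, _⟩ := rstrip_head_ne_dot hw_noDD hw_ne hw_head
  exact pad_eq hfin_ne

lemma solutionA_eq (s : String) :
    solution s = String.ofList (aFinish ((((PySem.Str.lower s).toList).foldl aStep ([], true)).1)) := by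
  simp only [solution, aFinish]

lemma solutionB_eq (s : String) :
    solution_alt s = String.ofList (bFinish (bCollapse (((PySem.Str.lower s).toList).filter bKeep))) := by
  simp only [solution_alt, bFinish]

-- ===== VERDICT (by name: the statement is the Claim_ definition above) =====
theorem solution_spec : Claim_equal_solution := by
  intro s _
  show solution s = solution_alt s
  rw [solutionA_eq, solutionB_eq, fold_eq, List.filter_congr (fun c _ => valid_eq c)]
  exact congrArg String.ofList (by
    rw [List.nil_append, (gLoop_spec _).1, cd_eq_bCollapse]
    exact tails_eq _ (bCollapse_noDD _))
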